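-- pv_equiv track=rewrite | github.com/dulwichbeijing/igcse-mini-ctf-4 | public/task-files/task6.py | chunk_and_change
-- ===== SOURCE A (Python) =====
-- def chunk_and_change(string_in):
--     string_length = len(string_in)
--     odds = ""
--     evens = ""
--     for x in range(string_length):
--         if x % 2 == 0:
--             evens = evens + string_in[x]
--         else:
--             odds = odds + string_in[x]
--     chunked = odds + evens
--     return chunked
-- ===== SOURCE B (Python) =====
-- def chunk_and_change(string_in):
--     return string_in[1::2] + string_in[::2]
-- ===== Notes on version B (the rewrite author's own statement) =====
-- stated objective: faster
-- what changed: Replaces the index loop with its per-character parity test and repeated string concatenation by two strided slices concatenated (string_in[1::2] + string_in[::2]).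
import Mathlib
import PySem

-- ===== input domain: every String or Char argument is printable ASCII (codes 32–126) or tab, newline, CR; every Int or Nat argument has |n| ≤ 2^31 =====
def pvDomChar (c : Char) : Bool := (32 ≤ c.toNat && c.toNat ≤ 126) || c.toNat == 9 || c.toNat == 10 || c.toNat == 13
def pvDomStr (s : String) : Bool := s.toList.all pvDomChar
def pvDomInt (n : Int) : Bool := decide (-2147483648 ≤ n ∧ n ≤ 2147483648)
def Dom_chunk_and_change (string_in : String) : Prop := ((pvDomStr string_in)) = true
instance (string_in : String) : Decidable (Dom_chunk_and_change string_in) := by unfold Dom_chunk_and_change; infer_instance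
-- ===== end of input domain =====

-- B replaces A's index loop (per-character parity test + repeated concatenation) by the two
-- strided slices string_in[1::2] + string_in[::2].

-- ===== PORT A =====
-- `for x in range(string_length)` building odds/evens by the parity of x; every index the loop
-- produces is in range, so pyGetD is exact here.
def chunk_and_change (string_in : String) : String :=
  let cs := string_in.toList
  let string_length := PySem.Str.len string_in
  let oe := (PySem.List.pyRange 0 string_length 1).foldl
    (fun (oe : List Char × List Char) x =>
      if PySem.Int.mod x 2 == 0 then (oe.1, oe.2 ++ [PySem.List.pyGetD cs x ' '])
      else (oe.1 ++ [PySem.List.pyGetD cs x ' '], oe.2))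
    ([], [])
  String.ofList (oe.1 ++ oe.2)

-- ===== PORT B =====
-- string_in[1::2] + string_in[::2]; slice? is none only for step 0, so `getD []` is a pure totalization.
def chunk_and_change_alt (string_in : String) : String :=
  String.ofList ((PySem.Chars.slice? string_in.toList (some 1) none 2).getD []
    ++ (PySem.Chars.slice? string_in.toList none none 2).getD [])

-- ===== PRECONDITION & SPEC =====
def Spec_chunk_and_change (string_in : String) (out : String) : Prop := out = chunk_and_change_alt string_in
instance (string_in : String) (out : String) : Decidable (Spec_chunk_and_change string_in out) := by unfold Spec_chunk_and_change; infer_instance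

-- ===== CLAIM (what is proved, stated in full; the proofs are below) =====
def Claim_equal_chunk_and_change : Prop := ∀ (string_in : String), Dom_chunk_and_change string_in → Spec_chunk_and_change string_in (chunk_and_change string_in)

-- ===== LEMMAS AND PROOFS =====

-- the characters of a list at even positions / at odd positions, taken two at a time
def evensOf : List Char → List Char
  | [] => []
  | [a] => [a]
  | a :: _ :: rest => a :: evensOf rest

def oddsOf : List Char → List Char
  | [] => []
  | [_] => []
  | _ :: b :: rest => b :: oddsOf rest

-- A's fold appends each indexed character to one of the two accumulators
theorem foldl_split (l : List Int) (cs : List Char) (o e : List Char) :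
    l.foldl (fun (oe : List Char × List Char) x =>
      if PySem.Int.mod x 2 == 0 then (oe.1, oe.2 ++ [PySem.List.pyGetD cs x ' '])
      else (oe.1 ++ [PySem.List.pyGetD cs x ' '], oe.2)) (o, e)
    = (o ++ (l.filter (fun x => !(PySem.Int.mod x 2 == 0))).map (fun x => PySem.List.pyGetD cs x ' '),
       e ++ (l.filter (fun x => PySem.Int.mod x 2 == 0)).map (fun x => PySem.List.pyGetD cs x ' ')) := by
  induction l generalizing o e with
  | nil => simp
  | cons x l ih =>
    cases hx : (PySem.Int.mod x 2 == 0) <;>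
      simp only [List.foldl_cons, List.filter_cons, hx, Bool.not_false, Bool.not_true,
        Bool.false_eq_true, if_true, if_false, List.map_cons] <;>
      rw [ih] <;> simp [List.append_assoc]

-- the even-position characters, read off A's way: as a filter of the index range
theorem evensOf_eq_filter (cs : List Char) :
    evensOf cs = ((List.range cs.length).filter (fun k => k % 2 == 0)).map (fun k => cs.getD k ' ') := by
  induction cs using evensOf.induct with
  | case1 => simp [evensOf]
  | case2 a => simp [evensOf]
  | case3 a b rest ih =>
    simp only [evensOf, List.length_cons]
    rw [List.range_succ_eq_map, List.range_succ_eq_map]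
    simp only [List.filter_cons, List.filter_map]
    rw [List.filter_congr (l := List.range rest.length)
      (q := fun k => k % 2 == 0) (by intro k _; simp; omega)]
    simp [Function.comp_def, ih]

theorem oddsOf_eq_filter (cs : List Char) :
    oddsOf cs = ((List.range cs.length).filter (fun k => !(k % 2 == 0))).map (fun k => cs.getD k ' ') := by
  induction cs using oddsOf.induct with
  | case1 => simp [oddsOf]
  | case2 a => simp [oddsOf]
  | case3 a b rest ih =>
    simp only [oddsOf, List.length_cons]
    rw [List.range_succ_eq_map, List.range_succ_eq_map]
    simp only [List.filter_cons, List.filter_map]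
    rw [List.filter_congr (l := List.range rest.length)
      (q := fun k => !(k % 2 == 0)) (by intro k _; simp; omega)]
    simp [Function.comp_def, ih]

-- the slice cs[::2], unfolded to the indices it reads
theorem slice2_raw (cs : List Char) :
    PySem.Chars.slice? cs none none 2
      = some ((List.range ((cs.length + 1) / 2)).filterMap (fun k => cs[2*k]?)) := by
  simp only [PySem.Chars.slice?, PySem.List.slice?, PySem.List.sliceIndices]
  norm_num
  have h1 : (if 0 < cs.length then (((cs.length : Int) + 2 - 1) / 2).toNat else 0)
      = (cs.length + 1) / 2 := by split <;> omega
  rw [h1]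
  apply List.filterMap_congr
  intro k _
  have h2 : ((2 * (k : Int)).toNat) = 2 * k := by omega
  rw [h2]

-- the slice cs[1::2], unfolded to the indices it reads
theorem slice2_odd_raw (cs : List Char) :
    PySem.Chars.slice? cs (some 1) none 2
      = some ((List.range (cs.length / 2)).filterMap (fun k => cs[2*k+1]?)) := by
  simp only [PySem.Chars.slice?, PySem.List.slice?, PySem.List.sliceIndices]
  norm_num
  cases cs with
  | nil => simp
  | cons a t =>
    have h1 : (if 1 < (a::t).length then
          ((((a::t).length : Int) - min 1 ((a::t).length : Int) + 2 - 1) / 2).toNat else 0)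
        = (a::t).length / 2 := by
      simp only [List.length_cons]; split <;> omega
    rw [h1]
    apply List.filterMap_congr
    intro k _
    have h2 : ((min 1 ((a::t).length : Int) + 2 * (k : Int)).toNat) = 2 * k + 1 := by
      simp only [List.length_cons]; omega
    rw [h2]

theorem evensOf_eq_filterMap (cs : List Char) :
    (List.range ((cs.length + 1) / 2)).filterMap (fun k => cs[2*k]?) = evensOf cs := by
  induction cs using evensOf.induct with
  | case1 => simp [evensOf]
  | case2 a => simp [evensOf]
  | case3 a b rest ih =>
    have h : ((a :: b :: rest).length + 1) / 2 = (rest.length + 1) / 2 + 1 := by simp; omega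
    rw [evensOf, h, List.range_succ_eq_map]
    simp only [List.filterMap_cons, List.filterMap_map]
    simp [Nat.mul_add, ih]

theorem oddsOf_eq_filterMap (cs : List Char) :
    (List.range (cs.length / 2)).filterMap (fun k => cs[2*k+1]?) = oddsOf cs := by
  induction cs using oddsOf.induct with
  | case1 => simp [oddsOf]
  | case2 a => simp [oddsOf]
  | case3 a b rest ih =>
    have h : (a :: b :: rest).length / 2 = rest.length / 2 + 1 := by simp; omega
    rw [oddsOf, h, List.range_succ_eq_map]
    simp only [List.filterMap_cons, List.filterMap_map]
    simp [Nat.mul_add, ih]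

-- ===== VERDICT (by name: the statement is the Claim_ definition above) =====
theorem chunk_and_change_spec : Claim_equal_chunk_and_change := by
  have hmod : ∀ k : Nat, (PySem.Int.mod (k : Int) 2 == 0) = (k % 2 == 0) := by
    intro k
    have h := PySem.Int.mod_natCast k 2
    rw [show ((2:Nat):Int) = (2:Int) by norm_num] at h
    rw [h]
    rcases Nat.mod_two_eq_zero_or_one k with h2 | h2 <;> simp [h2]
  intro s _
  unfold Spec_chunk_and_change chunk_and_change chunk_and_change_alt
  rw [slice2_odd_raw, slice2_raw, oddsOf_eq_filterMap, evensOf_eq_filterMap]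
  simp only [Option.getD_some]
  rw [PySem.Str.len_eq, PySem.List.pyRange_zero_natCast, foldl_split]
  rw [evensOf_eq_filter, oddsOf_eq_filter]
  simp only [List.filter_map, List.map_map, Function.comp_def, hmod,
    PySem.List.pyGetD_natCast, List.nil_append]
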